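-- pv_equiv track=rewrite | github.com/ffancer/study_with_codewars_part2 | 7 kyu Find all non-consecutive numbers.py | all_non_consecutive
-- ===== SOURCE A (Python) =====
-- def all_non_consecutive(arr):
--     lst = []
--
--     if len(arr) <= 1:
--         return lst
--
--     first = arr[0]
--
--     for i, j in enumerate(arr):
--         if first != j:
--             lst.append({'i': i, 'n': j})
--             first = j
--         first += 1
--
--     return lst
-- ===== SOURCE B (Python) =====
-- def all_non_consecutive(arr):
--     return [{'i': i, 'n': b}
--             for i, (a, b) in enumerate(zip(arr, arr[1:]), 1)
--             if b != a + 1]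
-- ===== Notes on version B (the rewrite author's own statement) =====
-- stated objective: simpler
-- what changed: Drops the threaded 'first' expected-value accumulator and the length guard: B is a single comprehension over adjacent pairs zip(arr, arr[1:]) that emits {'i': i, 'n': b} whenever b != a + 1.
import Mathlib
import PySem

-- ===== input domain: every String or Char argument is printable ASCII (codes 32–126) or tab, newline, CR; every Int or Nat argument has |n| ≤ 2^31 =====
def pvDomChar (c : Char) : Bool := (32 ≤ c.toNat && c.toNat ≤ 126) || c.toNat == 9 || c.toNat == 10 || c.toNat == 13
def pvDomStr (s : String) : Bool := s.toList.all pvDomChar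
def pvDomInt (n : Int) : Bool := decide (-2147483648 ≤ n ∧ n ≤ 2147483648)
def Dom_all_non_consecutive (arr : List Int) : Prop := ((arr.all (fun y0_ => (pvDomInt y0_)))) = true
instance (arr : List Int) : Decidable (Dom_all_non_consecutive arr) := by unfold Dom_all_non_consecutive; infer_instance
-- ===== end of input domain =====

-- B replaces A's threaded `first` expected-value accumulator and length guard with a
-- single filter over adjacent pairs (objective: simpler).


-- ===== PORT A =====
-- the loop body: state is (lst, first)
def ancStep (st : List (List (String × Int)) × Int) (ij : Int × Int) :
    List (List (String × Int)) × Int :=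
  let st' := if st.2 ≠ ij.2 then (st.1 ++ [[("i", ij.1), ("n", ij.2)]], ij.2) else st
  (st'.1, st'.2 + 1)

def all_non_consecutive (arr : List Int) : List (List (String × Int)) :=
  if arr.length ≤ 1 then []
  else
    -- arr[0]: exact, arr is nonempty on this branch
    let first := arr.headI
    ((PySem.List.enumerate arr 0).foldl ancStep
      (([] : List (List (String × Int))), first)).1

-- ===== PORT B =====
-- arr[1:] on a list is exactly arr.tail
def all_non_consecutive_alt (arr : List Int) : List (List (String × Int)) :=
  (PySem.List.enumerate (arr.zip arr.tail) 1).filterMap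
    (fun p => if p.2.2 ≠ p.2.1 + 1 then some [("i", p.1), ("n", p.2.2)] else none)

-- ===== PRECONDITION & SPEC =====
def Spec_all_non_consecutive (arr : List Int) (out : List (List (String × Int))) : Prop := out = all_non_consecutive_alt arr
instance (arr : List Int) (out : List (List (String × Int))) : Decidable (Spec_all_non_consecutive arr out) := by unfold Spec_all_non_consecutive; infer_instance

-- ===== CLAIM (what is proved, stated in full; the proofs are below) =====
def Claim_equal_all_non_consecutive : Prop := ∀ (arr : List Int), Dom_all_non_consecutive arr → Spec_all_non_consecutive arr (all_non_consecutive arr)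

-- ===== LEMMAS AND PROOFS =====

-- common normal form of both programs: scan l with expected-predecessor prev, index counter k
def ancGen (prev : Int) (k : Int) : List Int → List (List (String × Int))
  | [] => []
  | j :: t => (if j ≠ prev + 1 then [[("i", k), ("n", j)]] else []) ++ ancGen j (k + 1) t

theorem ancFold (l : List Int) : ∀ (prev k : Int) (acc : List (List (String × Int))),
    ((PySem.List.enumerate l k).foldl ancStep (acc, prev + 1)).1 = acc ++ ancGen prev k l := by
  induction l with
  | nil => intro prev k acc; simp [PySem.List.enumerate_nil, ancGen]
  | cons j t ih =>
    intro prev k acc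
    rw [PySem.List.enumerate_cons, List.foldl_cons]
    by_cases h : j = prev + 1
    · have hs : ancStep (acc, prev + 1) (k, j) = (acc, j + 1) := by
        simp [ancStep, h]
      rw [hs, ih j (k + 1) acc]
      simp [ancGen, h]
    · have hs : ancStep (acc, prev + 1) (k, j) = (acc ++ [[("i", k), ("n", j)]], j + 1) := by
        simp only [ancStep]
        rw [if_pos (show (prev + 1 : Int) ≠ j from fun e => h e.symm)]
      rw [hs, ih j (k + 1) (acc ++ [[("i", k), ("n", j)]])]
      simp [ancGen, h]

theorem ancFilter (l : List Int) : ∀ (prev k : Int),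
    (PySem.List.enumerate ((prev :: l).zip l) k).filterMap
      (fun p => if p.2.2 ≠ p.2.1 + 1 then some [("i", p.1), ("n", p.2.2)] else none)
    = ancGen prev k l := by
  induction l with
  | nil => intro prev k; simp [PySem.List.enumerate_nil, ancGen]
  | cons j t ih =>
    intro prev k
    show ((PySem.List.enumerate ((prev, j) :: (j :: t).zip t) k).filterMap _) = _
    rw [PySem.List.enumerate_cons, List.filterMap_cons]
    by_cases h : j = prev + 1
    · simpa [ancGen, h] using ih (prev + 1) (k + 1)
    · simpa [ancGen, h] using ih j (k + 1)

-- ===== VERDICT (by name: the statement is the Claim_ definition above) =====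
theorem all_non_consecutive_spec : Claim_equal_all_non_consecutive := by
  intro arr _
  show all_non_consecutive arr = all_non_consecutive_alt arr
  match arr with
  | [] => rfl
  | [x] => rfl
  | x :: y :: t =>
    unfold all_non_consecutive all_non_consecutive_alt
    rw [if_neg (by simp)]
    rw [PySem.List.enumerate_cons]
    show (List.foldl ancStep (([] : List (List (String × Int))), x)
        ((0, x) :: PySem.List.enumerate (y :: t) (0 + 1))).1 =
      ((PySem.List.enumerate ((x :: y :: t).zip (x :: y :: t).tail) 1).filterMap
        (fun p => if p.2.2 ≠ p.2.1 + 1 then some [("i", p.1), ("n", p.2.2)] else none))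
    rw [List.foldl_cons]
    have h0 : ancStep (([] : List (List (String × Int))), x) (0, x) = ([], x + 1) := by
      simp [ancStep]
    rw [h0]
    show ((PySem.List.enumerate (y :: t) 1).foldl ancStep ([], x + 1)).1 =
      ((PySem.List.enumerate ((x :: y :: t).zip (y :: t)) 1).filterMap
        (fun p => if p.2.2 ≠ p.2.1 + 1 then some [("i", p.1), ("n", p.2.2)] else none))
    rw [ancFold (y :: t) x 1 [], ancFilter (y :: t) x 1]
    simp
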